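-- pv_equiv track=rewrite | github.com/rigGitLikeYouDigGit/wpcode | python/wph/hda/texthda/gather.py | getNameVersionFromFileName
-- ===== SOURCE A (Python) =====
-- def getNameVersionFromFileName(s:str)->(str, int):
-- 	"""for a file named
-- 	gridTest_v02.json
-- 	return (gridTest, 2)
-- 	"""
-- 	stem, *suffix = s.split(".")
-- 	tokens = stem.split("_")
-- 	endTokenIndex = 0
-- 	version = -1
-- 	for i, tok in enumerate(tokens):
-- 		# check if this token is version - if yes, all previous are the name
-- 		versionTest = tok.replace("v", "").replace("V", "")
-- 		if versionTest.isdigit():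
-- 			endTokenIndex = i
-- 			version = int(versionTest)
-- 			break
-- 		if tok == "textHDA":
-- 			endTokenIndex = i
--
-- 	if endTokenIndex == 0: # no name found
-- 		return "", -1
-- 	return "_".join(tokens[:endTokenIndex+1]), version
-- ===== SOURCE B (Python) =====
-- def _first_version(tokens):
--     """(index, value) of the first version-like token, or None; plain recursion on the tail."""
--     if not tokens:
--         return None
--     vt = tokens[0].replace("v", "").replace("V", "")
--     if vt.isdigit():
--         return 0, int(vt)
--     r = _first_version(tokens[1:])
--     return None if r is None else (r[0] + 1, r[1])
--
--
-- def _last_hda(tokens):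
--     """last index of 'textHDA', or None; the tail is searched first so its hit wins."""
--     if not tokens:
--         return None
--     r = _last_hda(tokens[1:])
--     if r is not None:
--         return r + 1
--     return 0 if tokens[0] == "textHDA" else None
--
--
-- def getNameVersionFromFileName(s: str) -> (str, int):
--     tokens = s.split(".")[0].split("_")
--     hit = _first_version(tokens)
--     if hit is not None:
--         end, version = hit
--     else:
--         last = _last_hda(tokens)
--         end, version = (0 if last is None else last), -1
--     if end == 0:
--         return "", -1
--     return "_".join(tokens[: end + 1]), version
-- ===== Notes on version B (the rewrite author's own statement) =====
-- stated objective: alternative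
-- what changed: Replaces A's single stateful loop (index counter plus a mutable endTokenIndex accumulator interleaving two conditions with a break) by two independent recursive helpers with no accumulator: first-version-token search on the tail, and a tail-first recursive last-index search for 'textHDA' used only when no version token exists.
import Mathlib
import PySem

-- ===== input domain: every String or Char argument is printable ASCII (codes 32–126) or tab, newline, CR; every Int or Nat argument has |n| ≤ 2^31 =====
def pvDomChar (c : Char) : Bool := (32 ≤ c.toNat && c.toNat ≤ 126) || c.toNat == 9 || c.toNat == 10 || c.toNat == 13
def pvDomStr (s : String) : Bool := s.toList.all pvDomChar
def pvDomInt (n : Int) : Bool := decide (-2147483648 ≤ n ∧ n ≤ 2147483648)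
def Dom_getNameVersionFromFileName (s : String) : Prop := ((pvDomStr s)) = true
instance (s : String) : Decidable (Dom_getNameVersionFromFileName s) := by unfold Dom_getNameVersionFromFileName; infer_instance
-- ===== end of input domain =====

-- B replaces A's single accumulator loop by two independent recursive helpers (first version token; tail-first last 'textHDA' index); same value everywhere.

-- ===== PORT A =====
-- A's loop: state (endTokenIndex, version); break on the first version-like token.
-- ofStr? can never be none where it is read (strIsdigit holds: nonempty run of ASCII digits), so .getD 0 is exact for int(...).
def pvAScan : List String → Int → Int → Int → Int × Int
  | [], _, e, v => (e, v)
  | tok :: ts, i, e, v =>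
    let vt := PySem.Str.replace (PySem.Str.replace tok "v" "") "V" ""
    if PySem.Str.strIsdigit vt then (i, (PySem.Int.ofStr? vt).getD 0)
    else pvAScan ts (i + 1) (if tok == "textHDA" then i else e) v

def getNameVersionFromFileName (s : String) : String × Int :=
  -- stem, *suffix = s.split("."): split? with a nonempty sep is always some and nonempty, so getD/headD never fire
  let stem := ((PySem.Str.split? s ".").getD []).headD ""
  let tokens := (PySem.Str.split? stem "_").getD []
  let r := pvAScan tokens 0 0 (-1)
  if r.1 = 0 then ("", -1)
  else (PySem.Str.join "_" (PySem.List.slice tokens none (some (r.1 + 1))), r.2)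

-- ===== PORT B =====
-- _first_version: no accumulator; the tail's answer is shifted by one.
def pvFirstVersion : List String → Option (Nat × Int)
  | [] => none
  | t :: ts =>
    let vt := PySem.Str.replace (PySem.Str.replace t "v" "") "V" ""
    if PySem.Str.strIsdigit vt then some (0, (PySem.Int.ofStr? vt).getD 0)
    else
      match pvFirstVersion ts with
      | none => none
      | some r => some (r.1 + 1, r.2)

-- _last_hda: the tail is searched first so its hit wins.
def pvLastHda : List String → Option Nat
  | [] => none
  | t :: ts =>
    match pvLastHda ts with
    | some r => some (r + 1)
    | none => if t == "textHDA" then some 0 else none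

def getNameVersionFromFileName_alt (s : String) : String × Int :=
  let stem := ((PySem.Str.split? s ".").getD []).headD ""
  let tokens := (PySem.Str.split? stem "_").getD []
  let p : Nat × Int :=
    match pvFirstVersion tokens with
    | some h => h
    | none => ((pvLastHda tokens).getD 0, -1)
  if p.1 = 0 then ("", -1)
  else (PySem.Str.join "_" (tokens.take (p.1 + 1)), p.2)

-- ===== PRECONDITION & SPEC =====
def Spec_getNameVersionFromFileName (s : String) (out : String × Int) : Prop := out = getNameVersionFromFileName_alt s
instance (s : String) (out : String × Int) : Decidable (Spec_getNameVersionFromFileName s out) := by unfold Spec_getNameVersionFromFileName; infer_instance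

-- ===== CLAIM (what is proved, stated in full; the proofs are below) =====
def Claim_equal_getNameVersionFromFileName : Prop := ∀ (s : String), Dom_getNameVersionFromFileName s → Spec_getNameVersionFromFileName s (getNameVersionFromFileName s)

-- ===== LEMMAS AND PROOFS =====

-- A's scan, started at index i with accumulator e, in terms of B's two recursive searches
theorem pvScan_eq (ts : List String) : ∀ (i e : Int),
    pvAScan ts i e (-1) =
      match pvFirstVersion ts with
      | some h => (i + (h.1 : Int), h.2)
      | none =>
        match pvLastHda ts with
        | some k => (i + (k : Int), -1)
        | none => (e, -1) := by
  induction ts with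
  | nil => intro i e; simp [pvAScan, pvFirstVersion, pvLastHda]
  | cons tok ts ih =>
    intro i e
    by_cases hd : PySem.Str.strIsdigit (PySem.Str.replace (PySem.Str.replace tok "v" "") "V" "") = true
    · simp only [pvAScan, pvFirstVersion]
      rw [if_pos hd, if_pos hd]
      norm_num
    · simp only [pvAScan, pvFirstVersion, pvLastHda]
      rw [if_neg hd, if_neg hd, ih (i + 1) (if tok == "textHDA" then i else e)]
      cases hv : pvFirstVersion ts with
      | some r => simp; ring
      | none =>
        cases hl : pvLastHda ts with
        | some k => simp; ring
        | none =>
          by_cases hh : tok == "textHDA" <;> simp [hh]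

-- ===== VERDICT (by name: the statement is the Claim_ definition above) =====
theorem getNameVersionFromFileName_spec : Claim_equal_getNameVersionFromFileName := by
  intro s _
  unfold Spec_getNameVersionFromFileName getNameVersionFromFileName getNameVersionFromFileName_alt
  simp only [pvScan_eq _ 0]
  set tokens := ((PySem.Str.split? (((PySem.Str.split? s ".").getD []).headD "") "_").getD [])
  cases hv : pvFirstVersion tokens with
  | some h =>
    simp only [zero_add]
    by_cases h0 : h.1 = 0
    · simp [h0]
    · have : ((h.1 : Int)) ≠ 0 := by exact_mod_cast h0
      simp only [this, h0]
      rw [show ((h.1 : Int) + 1) = ((h.1 + 1 : Nat) : Int) by push_cast; ring,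
        PySem.List.slice_to_natCast]
  | none =>
    cases hl : pvLastHda tokens with
    | some k =>
      simp only [Option.getD_some, zero_add]
      by_cases h0 : k = 0
      · simp [h0]
      · have : ((k : Int)) ≠ 0 := by exact_mod_cast h0
        simp only [this, h0]
        rw [show ((k : Int) + 1) = ((k + 1 : Nat) : Int) by push_cast; ring,
          PySem.List.slice_to_natCast]
    | none => simp
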